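-- pv_equiv track=rewrite | github.com/dbaty/AWStatic | awstatic/reporter.py | get_periods
-- ===== SOURCE A (Python) =====
-- from collections import defaultdict
--
-- def get_periods(keys):
--     """Return periods of time to display (sorted with the most recent
--     first).
--
--     ``keys`` must be a sequence of strings that should be formatted as
--     'YYYYMM'. Keys that have less or more than 6 characters are
--     ignored. This function returns all given months plus all years
--     that have at least two months listed.
--
--     >>> get_periods(['201201', '201202', '201112'])
--     ['201202', '201201', '2012', '201112']
--     """
--     periods = []
--     years = defaultdict(lambda: 0)
--     for key in keys:
--         if len(key) != 6:
--             continue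
--         mm = key[4:]
--         yyyy = key[:4]
--         years[yyyy] += 1
--         periods.append(''.join((yyyy, mm)))
--     periods.extend(filter(lambda y: years[y] > 1, years.keys()))
--     periods.sort(reverse=1)
--     return periods
-- ===== SOURCE B (Python) =====
-- def get_periods(keys):
--     """Months (6-char keys) plus years having >= 2 month entries, sorted descending.
--
--     Sort-and-run-scan re-implementation: the year tallies come from scanning
--     runs of equal year prefixes in a sorted list instead of a defaultdict.
--     """
--     valid = [k for k in keys if len(k) == 6]
--     result = list(valid)
--     ys = sorted(k[:4] for k in valid)
--     n = len(ys)
--     i = 0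
--     while i < n:
--         j = i + 1
--         while j < n and ys[j] == ys[i]:
--             j += 1
--         if j - i > 1:
--             result.append(ys[i])
--         i = j
--     result.sort(reverse=True)
--     return result
-- ===== Notes on version B (the rewrite author's own statement) =====
-- stated objective: alternative
-- what changed: The defaultdict hash tally of months per year is replaced by sorting the year prefixes and scanning runs of equal years with a two-index while loop, so eligible years come from adjacency grouping instead of dictionary counting.
import Mathlib
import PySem

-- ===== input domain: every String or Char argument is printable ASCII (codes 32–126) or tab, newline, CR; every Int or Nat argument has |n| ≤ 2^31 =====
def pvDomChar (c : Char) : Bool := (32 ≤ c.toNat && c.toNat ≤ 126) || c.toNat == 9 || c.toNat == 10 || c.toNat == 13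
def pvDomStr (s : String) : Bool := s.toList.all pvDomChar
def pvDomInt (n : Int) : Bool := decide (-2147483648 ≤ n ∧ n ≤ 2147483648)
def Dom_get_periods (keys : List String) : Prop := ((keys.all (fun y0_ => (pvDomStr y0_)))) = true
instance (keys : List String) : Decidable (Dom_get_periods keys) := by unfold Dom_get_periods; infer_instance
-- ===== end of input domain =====

-- B replaces A's defaultdict year tally with a sort-and-run-scan over the year prefixes (alternative algorithm, same result).

-- ===== PORT A =====
def pvStepA (st : List String × PySem.Dict String Int) (key : String) : List String × PySem.Dict String Int :=
  if PySem.Str.len key ≠ 6 then st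
  else
    let mm := PySem.Str.slice key (some 4) none
    let yyyy := PySem.Str.slice key none (some 4)
    (st.1 ++ [PySem.Str.join "" [yyyy, mm]], st.2.modify yyyy 0 (· + 1))

def get_periods (keys : List String) : List String :=
  let st := keys.foldl pvStepA ([], PySem.Dict.empty)
  let periods := st.1 ++ st.2.keys.filter (fun y => st.2.getD y 0 > 1)
  PySem.List.sorted periods (fun x => x) true

-- ===== PORT B =====
-- the run scan over the sorted year list (the Python while/while loop)
def pvRuns : List String → List String
  | [] => []
  | x :: rest =>
    let run := rest.takeWhile (fun y => y == x)
    let rem := rest.dropWhile (fun y => y == x)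
    if run.length + 1 > 1 then x :: pvRuns rem else pvRuns rem
termination_by l => l.length
decreasing_by
  all_goals
    simp only [List.length_cons]
    exact Nat.lt_succ_of_le (List.length_dropWhile_le _ _)

def get_periods_alt (keys : List String) : List String :=
  let valid := keys.filter (fun k => PySem.Str.len k == 6)
  let ys := PySem.List.sorted (valid.map (fun k => PySem.Str.slice k none (some 4))) (fun x => x) false
  PySem.List.sorted (valid ++ pvRuns ys) (fun x => x) true

-- ===== PRECONDITION & SPEC =====
def Spec_get_periods (keys : List String) (out : List String) : Prop := out = get_periods_alt keys
instance (keys : List String) (out : List String) : Decidable (Spec_get_periods keys out) := by unfold Spec_get_periods; infer_instance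

-- ===== CLAIM (what is proved, stated in full; the proofs are below) =====
def Claim_equal_get_periods : Prop := ∀ (keys : List String), Dom_get_periods keys → Spec_get_periods keys (get_periods keys)

-- ===== LEMMAS AND PROOFS =====

-- A's loop, characterised: accumulated periods and the year counter dict.
theorem pvFoldA_spec (keys : List String) (acc : List String) (d : PySem.Dict String Int) :
    keys.foldl pvStepA (acc, d) =
      (acc ++ (keys.filter (fun k => PySem.Str.len k == 6)).map
          (fun k => PySem.Str.join "" [PySem.Str.slice k none (some 4), PySem.Str.slice k (some 4) none]),
       ((keys.filter (fun k => PySem.Str.len k == 6)).map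
          (fun k => PySem.Str.slice k none (some 4))).foldl (fun d y => d.modify y 0 (· + 1)) d) := by
  induction keys generalizing acc d with
  | nil => simp
  | cons k ks ih =>
    simp only [List.foldl_cons, pvStepA, List.filter_cons]
    by_cases h : PySem.Str.len k = 6
    · rw [if_neg (by simpa [PySem.Str.len] using h), if_pos (by simpa [PySem.Str.len] using h), ih]
      simp
    · rw [if_pos h, if_neg (by simpa [PySem.Str.len] using h), ih]

-- reassembling the two slices gives back the key
theorem pvRebuild_eq (k : String) :
    PySem.Str.join "" [PySem.Str.slice k none (some 4), PySem.Str.slice k (some 4) none] = k := by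
  rw [← String.toList_inj]
  simp [PySem.Str.toList_join, PySem.Str.toList_slice, PySem.Chars.slice_eq_listSlice,
    PySem.Chars.join]
  rw [PySem.List.slice_to _ (by norm_num), PySem.List.slice_from _ (by norm_num)]
  simp [List.intercalate]

-- splitting the head run of a weakly increasing list: order facts and counts
theorem pvRunsCore (x : String) (rest : List String) (hp : (x :: rest).Pairwise (· ≤ ·)) :
    (rest.dropWhile (fun y => y == x)).Pairwise (· ≤ ·) ∧
    (rest.dropWhile (fun y => y == x)).count x = 0 ∧
    ∀ v, (x :: rest).count v =
      (if v = x then (rest.takeWhile (fun y => y == x)).length + 1 else 0) +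
        (rest.dropWhile (fun y => y == x)).count v := by
  have hsplit : rest.takeWhile (fun y => y == x) ++ rest.dropWhile (fun y => y == x) = rest :=
    List.takeWhile_append_dropWhile
  have hrunall : ∀ y ∈ rest.takeWhile (fun y => y == x), y = x := by
    intro y hy
    simpa using List.mem_takeWhile_imp hy
  have hpair_rest : rest.Pairwise (· ≤ ·) := hp.of_cons
  have hx_le : ∀ z ∈ rest, x ≤ z := fun z hz => List.rel_of_pairwise_cons hp hz
  have hpair_rem : (rest.dropWhile (fun y => y == x)).Pairwise (· ≤ ·) :=
    hpair_rest.sublist (List.dropWhile_sublist _)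
  have hx_notin_rem : x ∉ rest.dropWhile (fun y => y == x) := by
    intro hmem
    cases hdw : rest.dropWhile (fun y => y == x) with
    | nil => simp [hdw] at hmem
    | cons h t =>
      have hne := List.head_dropWhile_not (fun y => y == x) (l := rest) (by simp [hdw])
      simp only [hdw, List.head_cons] at hne
      have hhx : h ≠ x := by simpa using hne
      have hhrest : h ∈ rest := (List.dropWhile_sublist (l := rest) (fun y => y == x)).subset (by simp [hdw])
      have hxh : x ≤ h := hx_le h hhrest
      have hxlt : x < h := lt_of_le_of_ne hxh (Ne.symm hhx)
      rw [hdw] at hmem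
      rcases List.mem_cons.mp hmem with rfl | hmt
      · exact absurd rfl (ne_of_gt hxlt)
      · have hht : h ≤ x := List.rel_of_pairwise_cons (hdw ▸ hpair_rem) hmt
        exact absurd (lt_of_lt_of_le hxlt hht) (lt_irrefl x)
  have hcount_rem_x : (rest.dropWhile (fun y => y == x)).count x = 0 :=
    List.count_eq_zero.mpr hx_notin_rem
  refine ⟨hpair_rem, hcount_rem_x, fun v => ?_⟩
  have hcount_run : (rest.takeWhile (fun y => y == x)).count v =
      if v = x then (rest.takeWhile (fun y => y == x)).length else 0 := by
    by_cases hv : v = x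
    · subst hv
      rw [if_pos rfl]
      exact List.count_eq_length.mpr (fun y hy => by simp [hrunall y hy])
    · simp only [if_neg hv]
      exact List.count_eq_zero.mpr (fun hmem => hv (hrunall v hmem))
  have hrest : rest.count v =
      (if v = x then (rest.takeWhile (fun y => y == x)).length else 0) +
        (rest.dropWhile (fun y => y == x)).count v := by
    conv_lhs => rw [← hsplit]
    rw [List.count_append, hcount_run]
  rw [List.count_cons, hrest]
  by_cases hv : v = x
  · simp [hv]
    omega
  · simp [hv]
    exact fun h => hv h.symm

-- the run scan on a weakly increasing list lists exactly the values of count ≥ 2, without repetition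
theorem pvRuns_spec (l : List String) (hp : l.Pairwise (· ≤ ·)) :
    (∀ v, v ∈ pvRuns l ↔ 2 ≤ l.count v) ∧ (pvRuns l).Nodup := by
  induction l using pvRuns.induct with
  | case1 => simp [pvRuns]
  | case2 x rest run rem hgt ih =>
    obtain ⟨hpr, hcx, hcnt⟩ := pvRunsCore x rest hp
    obtain ⟨ihmem, ihnd⟩ := ih hpr
    have hgt' : (rest.takeWhile (fun y => y == x)).length + 1 > 1 := hgt
    have hruns : pvRuns (x :: rest) = x :: pvRuns (rest.dropWhile (fun y => y == x)) := by
      conv_lhs => rw [pvRuns]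
      rw [if_pos hgt']
    constructor
    · intro v
      rw [hruns, hcnt v]
      by_cases hv : v = x
      · subst hv
        simp [hcx]
        omega
      · have hiv : v ∈ pvRuns (rest.dropWhile (fun y => y == x)) ↔
            2 ≤ List.count v (rest.dropWhile (fun y => y == x)) := ihmem v
        simp [hv, hiv]
    · rw [hruns]
      refine List.Nodup.cons ?_ ihnd
      intro hmem
      have h2 : 2 ≤ List.count x (rest.dropWhile (fun y => y == x)) := (ihmem x).mp hmem
      omega
  | case3 x rest run rem hgt ih =>
    obtain ⟨hpr, hcx, hcnt⟩ := pvRunsCore x rest hp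
    obtain ⟨ihmem, ihnd⟩ := ih hpr
    have hgt' : ¬ (rest.takeWhile (fun y => y == x)).length + 1 > 1 := hgt
    have hruns : pvRuns (x :: rest) = pvRuns (rest.dropWhile (fun y => y == x)) := by
      conv_lhs => rw [pvRuns]
      rw [if_neg hgt']
    refine ⟨fun v => ?_, hruns ▸ ihnd⟩
    have hiv : v ∈ pvRuns (rest.dropWhile (fun y => y == x)) ↔
        2 ≤ List.count v (rest.dropWhile (fun y => y == x)) := ihmem v
    rw [hruns, hcnt v, hiv]
    by_cases hv : v = x
    · have hlen : (rest.takeWhile (fun y => y == x)).length = 0 := by omega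
      subst hv
      simp [hcx, hlen]
    · simp [hv]

-- a reverse-sorted (identity key) list is determined by the multiset of its elements
theorem pvSortedRev_eq_of_perm (xs ys : List String) (h : xs.Perm ys) :
    PySem.List.sorted xs (fun x => x) true = PySem.List.sorted ys (fun x => x) true := by
  have hperm : (PySem.List.sorted xs (fun x => x) true).reverse.Perm
      (PySem.List.sorted ys (fun x => x) true).reverse :=
    (((List.reverse_perm _).trans (PySem.List.sorted_perm xs (fun x => x) true)).trans
      (h.trans (((List.reverse_perm _).trans (PySem.List.sorted_perm ys (fun x => x) true)).symm)))
  have h1 : (PySem.List.sorted xs (fun x => x) true).reverse.Pairwise (· ≤ ·) := by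
    rw [List.pairwise_reverse]
    exact PySem.List.sorted_pairwise_rev xs (fun x => x)
  have h2 : (PySem.List.sorted ys (fun x => x) true).reverse.Pairwise (· ≤ ·) := by
    rw [List.pairwise_reverse]
    exact PySem.List.sorted_pairwise_rev ys (fun x => x)
  have := PySem.List.eq_of_perm_of_pairwise_le_of_injective (fun x => x)
    (fun _ _ h => h) hperm h1 h2
  exact List.reverse_injective this

-- ===== VERDICT (by name: the statement is the Claim_ definition above) =====
theorem get_periods_spec : Claim_equal_get_periods := by
  intro keys _
  unfold Spec_get_periods get_periods get_periods_alt
  rw [pvFoldA_spec]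
  set valid := keys.filter (fun k => PySem.Str.len k == 6) with hvalid
  set ys := valid.map (fun k => PySem.Str.slice k none (some 4)) with hys
  simp only
  have hmap : valid.map
      (fun k => PySem.Str.join "" [PySem.Str.slice k none (some 4), PySem.Str.slice k (some 4) none]) = valid := by
    rw [List.map_congr_left (fun k _ => pvRebuild_eq k)]
    exact List.map_id _
  have hcounter : ys.foldl (fun d y => d.modify y 0 (· + 1)) PySem.Dict.empty =
      PySem.Dict.counter ys := (PySem.Dict.counter_eq_foldl ys).symm
  rw [hmap, hcounter]
  apply pvSortedRev_eq_of_perm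
  apply List.Perm.append_left
  -- the filtered counter keys vs the run scan of the sorted year list
  have hsp : (PySem.List.sorted ys (fun x => x) false).Pairwise (· ≤ ·) :=
    PySem.List.sorted_pairwise ys (fun x => x)
  obtain ⟨hrmem, hrnd⟩ := pvRuns_spec _ hsp
  have hcnt : ∀ v, (PySem.List.sorted ys (fun x => x) false).count v = ys.count v :=
    fun v => (PySem.List.sorted_perm ys _ false).count_eq v
  have hnd₁ : ((PySem.Dict.counter ys).keys.filter
      (fun y => (PySem.Dict.counter ys).getD y 0 > 1)).Nodup := by
    rw [PySem.Dict.keys_counter]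
    exact (PySem.Set.nodup_ofList ys).filter _
  rw [List.perm_ext_iff_of_nodup hnd₁ hrnd]
  intro a
  rw [PySem.Dict.keys_counter, List.mem_filter, PySem.Set.mem_ofList, PySem.Dict.getD_counter,
    hrmem a, hcnt a]
  constructor
  · rintro ⟨_, hgt⟩
    have : (1 : Int) < (ys.count a : Int) := by simpa using hgt
    omega
  · intro h2
    have hmem : a ∈ ys := List.count_pos_iff.mp (by omega)
    exact ⟨hmem, by simp; omega⟩
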